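-- pv_equiv track=rewrite | github.com/rossaofe/rws-sales-tracker | validation.py | autofix_step
-- ===== SOURCE A (Python) =====
-- FUNNEL_CHAINS: dict[str, list[str]] = {
--     "calls": [
--         "call_dial",
--         "call_connect",
--         "call_meaningful_convo",
--         "call_meeting_booked",
--     ],
--     "email": [
--         "email_sent",
--         "email_reply",
--         "email_positive",
--         "email_meeting_booked",
--     ],
--     "linkedin": [
--         "li_request_sent",
--         "li_accepted",
--         "li_reply",
--         "li_convo_started",
--         "li_meeting_booked",
--     ],
--     "meetings": [],  # no funnel constraint
-- }
--
-- def autofix_step(step_name: str, counts: dict) -> dict: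
--     """
--     Return a copy of counts with later-stage values clamped to their preceding stage.
--
--     Fixes are applied left-to-right so cascades are handled correctly:
--       dial=7, connect=10, meaningful=9  →  connect=7, meaningful=7
--     """
--     chain = FUNNEL_CHAINS.get(step_name, [])
--     result = {k: int(v or 0) for k, v in counts.items()}
--     for i in range(len(chain) - 1):
--         a, b = chain[i], chain[i + 1]
--         if result.get(b, 0) > result.get(a, 0):
--             result[b] = result.get(a, 0)
--     return result
-- ===== SOURCE B (Python) =====
-- FUNNEL_CHAINS: dict[str, list[str]] = {
--     "calls": [
--         "call_dial",
--         "call_connect",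
--         "call_meaningful_convo",
--         "call_meeting_booked",
--     ],
--     "email": [
--         "email_sent",
--         "email_reply",
--         "email_positive",
--         "email_meeting_booked",
--     ],
--     "linkedin": [
--         "li_request_sent",
--         "li_accepted",
--         "li_reply",
--         "li_convo_started",
--         "li_meeting_booked",
--     ],
--     "meetings": [],  # no funnel constraint
-- }
--
-- def autofix_step(step_name: str, counts: dict) -> dict:
--     """Clamp later funnel stages to their preceding stage via a prefix-minimum table."""
--     chain = FUNNEL_CHAINS.get(step_name, [])
--     result = {k: int(v or 0) for k, v in counts.items()}
--     # First pass: read every stage value once, then build the prefix-minimum table.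
--     vals = [result.get(s, 0) for s in chain]
--     mins = []
--     m = None
--     for v in vals:
--         m = v if m is None else min(m, v)
--         mins.append(m)
--     # Second pass: a stage needs fixing exactly when it exceeds the prefix minimum.
--     for b, v, m in zip(chain[1:], vals[1:], mins[1:]):
--         if v > m:
--             result[b] = m
--     return result
-- ===== Notes on version B (the rewrite author's own statement) =====
-- stated objective: alternative
-- what changed: Replaces the in-place cascading pairwise clamp (each step re-reading values it may just have written) with a two-pass scheme: read all stage values once, materialize a prefix-minimum table, then write result[chain[i]] = mins[i] exactly when vals[i] > mins[i].
import Mathlib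
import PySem

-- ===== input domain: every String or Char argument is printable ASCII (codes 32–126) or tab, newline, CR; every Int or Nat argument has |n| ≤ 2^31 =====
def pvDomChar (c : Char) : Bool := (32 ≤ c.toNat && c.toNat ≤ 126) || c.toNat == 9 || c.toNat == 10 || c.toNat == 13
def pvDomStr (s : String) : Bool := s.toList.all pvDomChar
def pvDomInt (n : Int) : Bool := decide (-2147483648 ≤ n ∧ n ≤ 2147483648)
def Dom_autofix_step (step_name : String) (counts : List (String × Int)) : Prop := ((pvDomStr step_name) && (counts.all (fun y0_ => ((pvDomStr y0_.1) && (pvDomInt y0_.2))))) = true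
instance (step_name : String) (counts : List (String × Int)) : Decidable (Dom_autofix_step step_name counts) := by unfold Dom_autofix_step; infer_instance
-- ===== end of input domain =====

-- B replaces A's in-place cascading pairwise clamp by two passes (read all values, build a
-- prefix-minimum table, then write the clamps); same cost, different decomposition.

-- ===== PORT A =====

-- the module constant FUNNEL_CHAINS
def funnelChains : PySem.Dict String (List String) :=
  PySem.Dict.ofList
    [("calls", ["call_dial", "call_connect", "call_meaningful_convo", "call_meeting_booked"]),
     ("email", ["email_sent", "email_reply", "email_positive", "email_meeting_booked"]),
     ("linkedin", ["li_request_sent", "li_accepted", "li_reply", "li_convo_started", "li_meeting_booked"]),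
     ("meetings", [])]

-- the copy comprehension {k: int(v or 0) for k, v in counts.items()} (identical line in A and B);
-- on Int values `int(v or 0)` is the identity (v == 0 gives int(0) = 0 = v), ported as such.
def pvCopyCounts (counts : List (String × Int)) : PySem.Dict String Int :=
  counts.foldl (fun d kv => d.insert kv.1 kv.2) PySem.Dict.empty

-- A's index loop over adjacent pairs (chain[i], chain[i+1]), reading the CURRENT dict each step
def pvAClamp : List String → PySem.Dict String Int → PySem.Dict String Int
  | a :: b :: rest, d =>
      pvAClamp (b :: rest) (if d.getD b 0 > d.getD a 0 then d.insert b (d.getD a 0) else d)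
  | _, d => d

def autofix_step (step_name : String) (counts : List (String × Int)) : List (String × Int) :=
  let chain := funnelChains.getD step_name []
  let result := pvCopyCounts counts
  (pvAClamp chain result).items

-- ===== PORT B =====

-- mins = running prefix minimum of vals (manual accumulate, as in Source B)
def pvAccumMin : Int → List Int → List Int
  | _, [] => []
  | m, v :: vs => let m' := min m v; m' :: pvAccumMin m' vs

def pvPrefixMins : List Int → List Int
  | [] => []
  | v :: vs => v :: pvAccumMin v vs

-- for b, v, m in zip(chain[1:], vals[1:], mins[1:]): if v > m: result[b] = m
def pvBWrite : List (String × Int × Int) → PySem.Dict String Int → PySem.Dict String Int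
  | [], d => d
  | (b, v, m) :: tl, d => pvBWrite tl (if v > m then d.insert b m else d)

def autofix_step_alt (step_name : String) (counts : List (String × Int)) : List (String × Int) :=
  let chain := funnelChains.getD step_name []
  let result := pvCopyCounts counts
  let vals := chain.map (fun s => result.getD s 0)
  let mins := pvPrefixMins vals
  (pvBWrite ((chain.drop 1).zip ((vals.drop 1).zip (mins.drop 1))) result).items

-- ===== PRECONDITION & SPEC =====
def Spec_autofix_step (step_name : String) (counts : List (String × Int)) (out : List (String × Int)) : Prop := out = autofix_step_alt step_name counts
instance (step_name : String) (counts : List (String × Int)) (out : List (String × Int)) : Decidable (Spec_autofix_step step_name counts out) := by unfold Spec_autofix_step; infer_instance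

-- ===== CLAIM (what is proved, stated in full; the proofs are below) =====
def Claim_equal_autofix_step : Prop := ∀ (step_name : String) (counts : List (String × Int)), Dom_autofix_step step_name counts → Spec_autofix_step step_name counts (autofix_step step_name counts)

-- ===== LEMMAS AND PROOFS =====

-- B's triple list (chain[1:], vals[1:], mins[1:]) computed with the running minimum threaded through
def pvMkT (m : Int) : List String → PySem.Dict String Int → List (String × Int × Int)
  | [], _ => []
  | s :: ss, d => (s, d.getD s 0, min m (d.getD s 0)) :: pvMkT (min m (d.getD s 0)) ss d

lemma pvZip_eq_mkT : ∀ (ss : List String) (m : Int) (d : PySem.Dict String Int),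
    ss.zip ((ss.map (fun s => d.getD s 0)).zip (pvAccumMin m (ss.map (fun s => d.getD s 0))))
      = pvMkT m ss d := by
  intro ss
  induction ss with
  | nil => intro m d; rfl
  | cons s tl ih => intro m d; simp [pvAccumMin, pvMkT, ih]

lemma pvMkT_congr : ∀ (ss : List String) (m : Int) (d₁ d₂ : PySem.Dict String Int),
    (∀ s ∈ ss, d₁.getD s 0 = d₂.getD s 0) → pvMkT m ss d₁ = pvMkT m ss d₂ := by
  intro ss
  induction ss with
  | nil => intro _ _ _ _; rfl
  | cons s tl ih =>
    intro m d₁ d₂ h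
    have hs := h s (List.mem_cons_self ..)
    simp only [pvMkT, hs]
    exact congrArg _ (ih _ d₁ d₂ fun x hx => h x (List.mem_cons_of_mem _ hx))

lemma pvAClamp_eq_bWrite : ∀ (ss : List String) (a : String) (d : PySem.Dict String Int),
    ss.Nodup → pvAClamp (a :: ss) d = pvBWrite (pvMkT (d.getD a 0) ss d) d := by
  intro ss
  induction ss with
  | nil => intro a d _; rfl
  | cons b rest ih =>
    intro a d hnd
    have hb : b ∉ rest := (List.nodup_cons.mp hnd).1
    have hrest : rest.Nodup := (List.nodup_cons.mp hnd).2
    set va := d.getD a 0 with hva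
    set vb := d.getD b 0 with hvb
    by_cases hgt : vb > va
    · have hmin : min va vb = va := by omega
      have hd1b : (d.insert b va).getD b 0 = va := PySem.Dict.getD_insert_self ..
      simp only [pvAClamp, pvBWrite, pvMkT, ← hva, ← hvb, hmin, if_pos hgt]
      rw [ih b (d.insert b va) hrest, hd1b]
      congr 1
      exact pvMkT_congr rest va _ d fun s hs =>
        PySem.Dict.getD_insert_of_ne _ _ _ (fun h => hb (h ▸ hs))
    · have hmin : min va vb = vb := by omega
      simp only [pvAClamp, pvBWrite, pvMkT, ← hva, ← hvb, hmin, if_neg hgt]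
      rw [ih b d hrest, if_neg (lt_irrefl vb), ← hvb]

lemma pvChains_nodup (s : String) : (funnelChains.getD s []).Nodup := by
  have h : funnelChains = PySem.Dict.mk
      [("calls", ["call_dial", "call_connect", "call_meaningful_convo", "call_meeting_booked"]),
       ("email", ["email_sent", "email_reply", "email_positive", "email_meeting_booked"]),
       ("linkedin", ["li_request_sent", "li_accepted", "li_reply", "li_convo_started", "li_meeting_booked"]),
       ("meetings", [])] := by decide
  rw [h, PySem.Dict.getD_eq_get?_getD]
  simp only [PySem.Dict.get?_mk_cons]
  split_ifs <;> simp [PySem.Dict.get?]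

-- ===== VERDICT (by name: the statement is the Claim_ definition above) =====
theorem autofix_step_spec : Claim_equal_autofix_step := by
  intro sn counts _
  unfold Spec_autofix_step autofix_step autofix_step_alt
  have hnd := pvChains_nodup sn
  cases hch : funnelChains.getD sn [] with
  | nil => simp [pvAClamp, pvBWrite, pvPrefixMins]
  | cons c0 ss =>
    rw [hch] at hnd
    simp only [List.map_cons, pvPrefixMins, List.drop_succ_cons, List.drop_zero]
    rw [pvZip_eq_mkT]
    rw [pvAClamp_eq_bWrite ss c0 _ (List.nodup_cons.mp hnd).2]
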